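-- pv_equiv track=rewrite | github.com/Ibraheem-Khalil/north | scripts/evaluate_retrieval.py | _check_entities
-- ===== SOURCE A (Python) =====
-- from typing import List, Dict, Any, Optional
--
-- def _check_entities(response: str, expected_entities: List[str]) -> tuple[List[str], List[str]]:
--     """Check which expected entities are present in response"""
--     response_lower = response.lower()
--     found = []
--     missing = []
--
--     for entity in expected_entities:
--         if entity.lower() in response_lower:
--             found.append(entity)
--         else:
--             missing.append(entity)
--
--     return found, missing
-- ===== SOURCE B (Python) =====
-- def _check_entities(response, expected_entities):
--     """Check which expected entities are present in response"""
--     response_lower = response.lower()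
--     hits = {p: p in response_lower
--             for p in dict.fromkeys(e.lower() for e in expected_entities)}
--     found = [e for e in expected_entities if hits[e.lower()]]
--     missing = [e for e in expected_entities if not hits[e.lower()]]
--     return found, missing
-- ===== Notes on version B (the rewrite author's own statement) =====
-- stated objective: alternative
-- what changed: B builds a lookup table of distinct lowered patterns to presence once (so duplicate entities are substring-searched only once) and then produces found/missing as two partition passes over the original list, instead of A's single loop doing a fresh substring test and two-accumulator append per entity.
import Mathlib
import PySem

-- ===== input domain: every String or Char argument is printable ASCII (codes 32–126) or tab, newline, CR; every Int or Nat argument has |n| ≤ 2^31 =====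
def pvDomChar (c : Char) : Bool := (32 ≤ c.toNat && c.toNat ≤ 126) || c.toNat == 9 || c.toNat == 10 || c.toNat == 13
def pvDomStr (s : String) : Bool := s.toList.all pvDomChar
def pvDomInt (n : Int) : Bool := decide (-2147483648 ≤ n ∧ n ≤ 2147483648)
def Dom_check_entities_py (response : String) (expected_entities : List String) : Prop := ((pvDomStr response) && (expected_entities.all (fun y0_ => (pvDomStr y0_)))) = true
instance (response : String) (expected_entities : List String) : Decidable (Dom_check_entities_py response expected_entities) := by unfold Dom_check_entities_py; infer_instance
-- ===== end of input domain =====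

-- B replaces A's per-entity test-and-append loop by a presence table over distinct lowered
-- patterns followed by two partition passes; alternative structure, same exact result.
-- ===== PORT A =====
def check_entities_py (response : String) (expected_entities : List String) : List String × List String :=
  let response_lower := PySem.Str.lower response
  expected_entities.foldl
    (fun (acc : List String × List String) entity =>
      if PySem.Str.isIn (PySem.Str.lower entity) response_lower then
        (acc.1 ++ [entity], acc.2)
      else
        (acc.1, acc.2 ++ [entity]))
    ([], [])

-- ===== PORT B =====
def check_entities_py_alt (response : String) (expected_entities : List String) : List String × List String :=
  let response_lower := PySem.Str.lower response
  let pats := PySem.List.dedup (expected_entities.map (fun e => PySem.Str.lower e))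
  let hits : PySem.Dict String Bool :=
    pats.foldl (fun d p => d.insert p (PySem.Str.isIn p response_lower)) PySem.Dict.empty
  let found := expected_entities.filter (fun e => hits.getD (PySem.Str.lower e) false)
  let missing := expected_entities.filter (fun e => !(hits.getD (PySem.Str.lower e) false))
  (found, missing)

-- ===== PRECONDITION & SPEC =====
def Spec_check_entities_py (response : String) (expected_entities : List String) (out : List String × List String) : Prop := out = check_entities_py_alt response expected_entities
instance (response : String) (expected_entities : List String) (out : List String × List String) : Decidable (Spec_check_entities_py response expected_entities out) := by unfold Spec_check_entities_py; infer_instance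

-- ===== CLAIM (what is proved, stated in full; the proofs are below) =====
def Claim_equal_check_entities_py : Prop := ∀ (response : String) (expected_entities : List String), Dom_check_entities_py response expected_entities → Spec_check_entities_py response expected_entities (check_entities_py response expected_entities)

-- ===== LEMMAS AND PROOFS =====

-- ===== VERDICT (by name: the statement is the Claim_ definition above) =====
-- the foldl-built presence table maps every listed pattern p to f p
theorem getD_foldl_insert_fn (f : String → Bool) (pats : List String)
    (d : PySem.Dict String Bool) (q : String) :
    (pats.foldl (fun d p => d.insert p (f p)) d).getD q false
      = if q ∈ pats then f q else d.getD q false := by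
  induction pats generalizing d with
  | nil => simp
  | cons p rest ih =>
      simp only [List.foldl_cons, ih, List.mem_cons]
      by_cases hq : q ∈ rest
      · simp [hq]
      · rcases eq_or_ne q p with rfl | hne
        · simp [hq]
        · simp [hq, hne, PySem.Dict.getD_insert]

theorem hits_eval (response_lower : String) (es : List String) (e : String) (he : e ∈ es) :
    ((PySem.List.dedup (es.map (fun x => PySem.Str.lower x))).foldl
        (fun d p => d.insert p (PySem.Str.isIn p response_lower)) PySem.Dict.empty).getD
      (PySem.Str.lower e) false
      = PySem.Str.isIn (PySem.Str.lower e) response_lower := by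
  rw [getD_foldl_insert_fn (fun p => PySem.Str.isIn p response_lower)]
  have : PySem.Str.lower e ∈ PySem.List.dedup (es.map (fun x => PySem.Str.lower x)) := by
    rw [PySem.List.mem_dedup]
    exact List.mem_map_of_mem he
  rw [if_pos this]

-- A's loop is a two-sided partition by the substring test
theorem foldl_partition (p : String → Bool) (es : List String) (acc : List String × List String) :
    es.foldl (fun (acc : List String × List String) e =>
        if p e then (acc.1 ++ [e], acc.2) else (acc.1, acc.2 ++ [e])) acc
      = (acc.1 ++ es.filter p, acc.2 ++ es.filter (fun e => !(p e))) := by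
  induction es generalizing acc with
  | nil => simp
  | cons e rest ih =>
      simp only [List.foldl_cons]
      by_cases hp : p e = true
      · simp [hp, ih]
      · simp only [Bool.not_eq_true] at hp
        simp [hp, ih]

theorem check_entities_py_spec : Claim_equal_check_entities_py := by
  intro response es _
  unfold Spec_check_entities_py check_entities_py check_entities_py_alt
  simp only []
  rw [foldl_partition]
  refine Prod.ext ?_ ?_ <;>
    simp only [List.nil_append] <;>
    exact (List.filter_congr (fun e he => by rw [hits_eval _ _ _ he])).symm
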